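-- pv_equiv track=rewrite | github.com/BillyChao/leetcode | 华为机试/最多颜色的车辆.py | getResultNew
-- ===== SOURCE A (Python) =====
-- def getResultNew(arr, num):
--     colors = {}
--     l, r = 0, int(num)
--     for i in arr[l:r]:
--         if i not in colors:
--             colors[i] = 0
--         colors[i] += 1
--     max_len = max(colors.values())
--     while r < len(arr):
--         add = arr[r]
--         remove = arr[l]
--         l += 1
--         r += 1
--         if add not in colors:
--             colors[add] = 0
--         colors[add] += 1
--         colors[remove] -= 1
--         max_len = max(max_len, colors[add])
--     return max_len
-- ===== SOURCE B (Python) =====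
-- def getResultNew(arr, num):
--     num = int(num)
--     best = 0
--     for p in range(len(arr)):
--         best = max(best, arr[max(p - num + 1, 0):p + 1].count(arr[p]))
--     return best
-- ===== Notes on version B (the rewrite author's own statement) =====
-- stated objective: simpler
-- what changed: Replaces A's incrementally maintained dict of window counts (add/remove bookkeeping plus a running max seeded from the first window) with a direct per-position scan: for each index p, count arr[p] inside the window of num elements ending at p, folding max.
import Mathlib
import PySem

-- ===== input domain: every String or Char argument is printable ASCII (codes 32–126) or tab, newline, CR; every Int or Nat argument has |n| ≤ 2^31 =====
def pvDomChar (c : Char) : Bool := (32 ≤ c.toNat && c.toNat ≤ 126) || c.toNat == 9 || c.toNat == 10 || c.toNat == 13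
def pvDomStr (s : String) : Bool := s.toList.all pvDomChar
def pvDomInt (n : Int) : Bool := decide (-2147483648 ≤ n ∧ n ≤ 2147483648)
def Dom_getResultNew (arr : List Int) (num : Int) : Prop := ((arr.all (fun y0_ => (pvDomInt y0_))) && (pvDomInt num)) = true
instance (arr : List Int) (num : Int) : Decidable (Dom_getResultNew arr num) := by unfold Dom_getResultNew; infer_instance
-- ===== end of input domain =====

-- B replaces A's incremental dict-of-counts sliding window with a direct per-position
-- scan (count the current element inside the window of `num` elements ending at it),
-- which is shorter and needs no mutable counter state; objective: simpler.

-- ===== PORT A =====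
-- the `while r < len(arr)` loop; fuel = arr.length bounds the iteration count
-- (the loop runs len(arr) - num < len(arr) times on every input Pre_ admits).
-- `colors[add]` / `colors[remove]` are read with getD 0: both keys are present at
-- every read reached under Pre_ (add was just inserted, remove is in the window).
def getResultNewLoop (arr : List Int) : Nat → PySem.Dict Int Int → Int → Int → Int → Int
  | 0, _, maxLen, _, _ => maxLen
  | fuel+1, colors, maxLen, l, r =>
    if r < PySem.List.len arr then
      let add := PySem.List.pyGetD arr r 0        -- arr[r]; in range whenever reached under Pre_
      let remove := PySem.List.pyGetD arr l 0     -- arr[l]; in range whenever reached under Pre_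
      let c1 := if colors.contains add then colors else colors.insert add 0
      let c2 := c1.insert add (c1.getD add 0 + 1)
      let c3 := c2.insert remove (c2.getD remove 0 - 1)
      getResultNewLoop arr fuel c3 (max maxLen (c3.getD add 0)) (l + 1) (r + 1)
    else maxLen

def getResultNew (arr : List Int) (num : Int) : Int :=
  let colors := (PySem.List.slice arr (some 0) (some num)).foldl
    (fun d i =>
      let d' := if d.contains i then d else d.insert i 0   -- if i not in colors: colors[i] = 0
      d'.insert i (d'.getD i 0 + 1))                       -- colors[i] += 1
    PySem.Dict.empty
  -- max(colors.values()); `(…).getD 0` stands for the ValueError on an empty dict,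
  -- unreachable under Pre_ (the initial window is nonempty).
  let maxLen := (PySem.List.max? colors.values (fun v => v)).getD 0
  getResultNewLoop arr arr.length colors maxLen 0 num

-- ===== PORT B =====
def getResultNew_alt (arr : List Int) (num : Int) : Int :=
  (PySem.List.pyRange 0 (PySem.List.len arr) 1).foldl
    (fun best p =>
      max best
        ((PySem.List.count
            (PySem.List.slice arr (some (max (p - num + 1) 0)) (some (p + 1)))
            (PySem.List.pyGetD arr p 0) : Int)))   -- arr[p]; p ∈ range(len(arr)) is in range
    0

-- ===== PRECONDITION & SPEC =====
-- Pre_ excludes exactly the inputs on which A raises: the empty list and num ≤ 0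
-- (ValueError from max() on an empty first window; for num < 0 an IndexError from
-- the left pointer running past the end). A returns on every other input.
def Pre_getResultNew (arr : List Int) (num : Int) : Prop := arr ≠ [] ∧ 1 ≤ num
instance (arr : List Int) (num : Int) : Decidable (Pre_getResultNew arr num) := by
  unfold Pre_getResultNew; infer_instance

def pvWitness_getResultNew : List Int × Int := ([2, 1, 2, 3, 2], 3)

def Spec_getResultNew (arr : List Int) (num : Int) (out : Int) : Prop := out = getResultNew_alt arr num
instance (arr : List Int) (num : Int) (out : Int) : Decidable (Spec_getResultNew arr num out) := by unfold Spec_getResultNew; infer_instance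

-- ===== CLAIM (what is proved, stated in full; the proofs are below) =====
def Claim_equal_getResultNew : Prop := ∀ (arr : List Int) (num : Int), Dom_getResultNew arr num → Pre_getResultNew arr num → Spec_getResultNew arr num (getResultNew arr num)


-- ===== LEMMAS AND PROOFS =====

-- the per-position window count both programs agree on: the number of occurrences of
-- arr[q] in the window of (at most) k elements of arr ending at position q
def cWin (arr : List Int) (k q : Nat) : Int :=
  (List.count (arr.getD q 0) (List.take (q + 1 - (q + 1 - k)) (List.drop (q + 1 - k) arr)) : Int)

lemma foldl_max_ge {α : Type} (f : α → Int) :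
    ∀ (l : List α) (init : Int), init ≤ l.foldl (fun m x => max m (f x)) init ∧
      ∀ a ∈ l, f a ≤ l.foldl (fun m x => max m (f x)) init := by
  intro l
  induction l with
  | nil => intro init; exact ⟨le_refl _, by simp⟩
  | cons b t ih =>
    intro init
    refine ⟨le_trans (le_max_left _ _) (ih (max init (f b))).1, ?_⟩
    intro a ha
    rcases List.mem_cons.mp ha with rfl | ha
    · exact le_trans (le_max_right _ _) (ih (max init (f a))).1
    · exact (ih (max init (f b))).2 a ha

lemma foldl_max_le {α : Type} (f : α → Int) :
    ∀ (l : List α) (init c : Int), init ≤ c → (∀ a ∈ l, f a ≤ c) →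
      l.foldl (fun m x => max m (f x)) init ≤ c := by
  intro l
  induction l with
  | nil => intro init c h _; simpa using h
  | cons b t ih =>
    intro init c h hall
    exact ih _ c (max_le h (hall b List.mem_cons_self)) (fun a ha => hall a (List.mem_cons_of_mem _ ha))

lemma exists_last_occ (w : List Int) (x : Int) (hx : x ∈ w) :
    ∃ q, q < w.length ∧ w.getD q 0 = x ∧ x ∉ w.drop (q + 1) := by
  induction w using List.reverseRecOn with
  | nil => simp at hx
  | append_singleton ys y ih =>
    by_cases hxy : x = y
    · refine ⟨ys.length, by simp, ?_, ?_⟩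
      · subst hxy
        simp [List.getD]
      · simp [List.drop_eq_nil_of_le]
    · have hxs : x ∈ ys := by
        rcases List.mem_append.mp hx with h | h
        · exact h
        · simp at h; exact absurd h hxy
      obtain ⟨q, hq, hget, hnot⟩ := ih hxs
      refine ⟨q, by simp; omega, ?_, ?_⟩
      · rw [← hget]
        simp [List.getD, List.getElem?_append_left hq]
      · rw [List.drop_append_of_le_length (by omega)]
        simp [hnot, hxy]

lemma build_step_eq (d : PySem.Dict Int Int) (i : Int) :
    (let d' := if d.contains i then d else d.insert i 0
     d'.insert i (d'.getD i 0 + 1)) = d.insert i (d.getD i 0 + 1) := by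
  by_cases h : d.contains i
  · simp [h]
  · simp only [Bool.not_eq_true] at h
    simp only [h, Bool.false_eq_true, if_false]
    rw [PySem.Dict.getD_insert_self, PySem.Dict.insert_insert_self,
      PySem.Dict.getD_of_not_contains d 0 h, zero_add]

lemma counter_max_eq (w : List Int) (hw : w ≠ []) :
    (PySem.List.max? (PySem.Dict.counter w).values (fun v => v)).getD 0 =
      (List.range' 0 w.length).foldl
        (fun m q => max m ((List.count (w.getD q 0) (w.take (q + 1)) : Int))) 0 := by
  have hvals : (PySem.Dict.counter w).values =
      (PySem.Set.ofList w).map (fun x => (List.count x w : Int)) := by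
    simp only [PySem.Dict.values, PySem.Dict.items_counter, List.map_map]
    rfl
  have hne : (PySem.Dict.counter w).values ≠ [] := by
    rw [hvals]
    obtain ⟨a, ha⟩ := List.exists_mem_of_ne_nil w hw
    have : a ∈ PySem.Set.ofList w := (PySem.Set.mem_ofList w a).mpr ha
    intro h
    rw [List.map_eq_nil_iff] at h
    rw [h] at this
    simp at this
  cases hmax : PySem.List.max? (PySem.Dict.counter w).values (fun v => v) with
  | none => exact absurd ((PySem.List.max?_eq_none_iff _ _).mp hmax) hne
  | some M =>
    have hMmem : M ∈ (PySem.Dict.counter w).values := PySem.List.max?_mem hmax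
    have hMbig : ∀ y ∈ (PySem.Dict.counter w).values, y ≤ M := by
      intro y hy; exact PySem.List.max?_isMax hmax y hy
    rw [hvals] at hMmem hMbig
    obtain ⟨x, hxmem, hxM⟩ := List.mem_map.mp hMmem
    have hxw : x ∈ w := (PySem.Set.mem_ofList w x).mp hxmem
    simp only [Option.getD_some]
    apply le_antisymm
    · -- M ≤ fold: M is attained at the last occurrence of x
      obtain ⟨q, hq, hget, hnot⟩ := exists_last_occ w x hxw
      have hcnt : List.count x (w.take (q + 1)) = List.count x w := by
        conv_rhs => rw [← List.take_append_drop (q + 1) w]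
        rw [List.count_append, List.count_eq_zero.mpr hnot, Nat.add_zero]
        rfl
      have hqmem : q ∈ List.range' 0 w.length := by
        rw [List.mem_range'_1]; omega
      have := (foldl_max_ge (fun q => (List.count (w.getD q 0) (w.take (q + 1)) : Int))
        (List.range' 0 w.length) 0).2 q hqmem
      rw [hget, hcnt, hxM] at this
      exact this
    · -- fold ≤ M
      apply foldl_max_le
      · rw [← hxM]; exact_mod_cast Nat.zero_le _
      · intro q hq
        rw [List.mem_range'_1] at hq
        have hqlt : q < w.length := by omega
        have h1 : List.count (w.getD q 0) (w.take (q + 1)) ≤ List.count (w.getD q 0) w :=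
          List.Sublist.count_le _ (List.take_sublist _ _)
        have h2 : (List.count (w.getD q 0) w : Int) ≤ M := by
          apply hMbig
          exact List.mem_map.mpr ⟨w.getD q 0, (PySem.Set.mem_ofList w _).mpr
            (by rw [List.getD_eq_getElem _ _ hqlt]; exact List.getElem_mem _), rfl⟩
        calc (List.count (w.getD q 0) (w.take (q + 1)) : Int)
            ≤ (List.count (w.getD q 0) w : Int) := by exact_mod_cast h1
          _ ≤ M := h2

lemma altB (arr : List Int) (num : Int) (hnum : 1 ≤ num) :
    getResultNew_alt arr num =
      (List.range' 0 arr.length).foldl (fun m q => max m (cWin arr num.toNat q)) 0 := by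
  unfold getResultNew_alt
  rw [PySem.List.len_eq, PySem.List.pyRange_one, List.foldl_map]
  rw [show ((arr.length : Int) - 0).toNat = arr.length by omega]
  rw [List.range_eq_range']
  apply PySem.List.foldl_congr_mem
  intro acc q hq
  rw [List.mem_range'_1] at hq
  have h1 : (0 : Int) + (q : Int) = ((q : Nat) : Int) := by omega
  rw [h1]
  have h2 : max (((q : Nat) : Int) - num + 1) 0 = ((q + 1 - num.toNat : Nat) : Int) := by omega
  have h3 : ((q : Nat) : Int) + 1 = (((q + 1 : Nat)) : Int) := by omega
  rw [h2, h3, PySem.List.slice_natCast, PySem.List.pyGetD_natCast, PySem.List.count_eq]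
  rfl

lemma loopA (arr : List Int) (k : Nat) (hk : 1 ≤ k) :
    ∀ (fuel j : Nat) (colors : PySem.Dict Int Int) (maxLen : Int),
      arr.length ≤ j + k + fuel →
      (∀ x, colors.getD x 0 = (List.count x ((arr.drop j).take k) : Int)) →
      getResultNewLoop arr fuel colors maxLen (j : Int) ((j : Int) + (k : Int)) =
        (List.range' (j + k) (arr.length - (j + k))).foldl
          (fun m q => max m (cWin arr k q)) maxLen := by
  obtain ⟨k', rfl⟩ : ∃ k', k = k' + 1 := ⟨k - 1, by omega⟩
  intro fuel
  induction fuel with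
  | zero =>
    intro j colors maxLen hfuel hinv
    have : arr.length - (j + (k' + 1)) = 0 := by omega
    rw [this]
    simp [getResultNewLoop]
  | succ fuel ih =>
    intro j colors maxLen hfuel hinv
    rw [getResultNewLoop]
    simp only [PySem.List.len_eq]
    by_cases hlt : j + (k' + 1) < arr.length
    · rw [if_pos (by exact_mod_cast hlt)]
      -- the two element reads
      have hr : (j : Int) + ((k' + 1 : Nat) : Int) = (((j + (k' + 1) : Nat)) : Int) := by omega
      rw [hr, PySem.List.pyGetD_natCast, PySem.List.pyGetD_natCast]
      set add := arr.getD (j + (k' + 1)) 0 with hadd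
      set remove := arr.getD j 0 with hremove
      -- window decomposition
      have hjlt : j < arr.length := by omega
      have hmidlt : k' < (arr.drop (j + 1)).length := by
        rw [List.length_drop]; omega
      have hw1 : (arr.drop j).take (k' + 1) = remove :: (arr.drop (j + 1)).take k' := by
        rw [List.drop_eq_getElem_cons hjlt, List.take_succ_cons, hremove,
          List.getD_eq_getElem _ _ hjlt]
      have hw2 : (arr.drop (j + 1)).take (k' + 1) = (arr.drop (j + 1)).take k' ++ [add] := by
        rw [List.take_succ, List.getElem?_eq_getElem hmidlt]
        rw [hadd, List.getD_eq_getElem _ _ (by omega : j + (k' + 1) < arr.length)]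
        have hidx : j + 1 + k' = j + (k' + 1) := by omega
        simp only [List.getElem_drop, Option.toList_some, hidx]
      -- the getD 0 invariant for the updated dict
      have hc1 : ∀ x, ((if colors.contains add then colors else colors.insert add 0).getD x 0)
          = colors.getD x 0 := by
        intro x
        by_cases hc : colors.contains add
        · rw [if_pos hc]
        · rw [if_neg (by simp [hc]), PySem.Dict.getD_insert]
          split_ifs with hx
          · subst hx; rw [PySem.Dict.getD_of_not_contains colors 0 (by simpa using hc)]
          · rfl
      have hinv' : ∀ x,
          (((if colors.contains add then colors else colors.insert add 0).insert add
              ((if colors.contains add then colors else colors.insert add 0).getD add 0 + 1)).insert remove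
              (((if colors.contains add then colors else colors.insert add 0).insert add
                ((if colors.contains add then colors else colors.insert add 0).getD add 0 + 1)).getD remove 0 - 1)).getD x 0
            = (List.count x ((arr.drop (j + 1)).take (k' + 1)) : Int) := by
        intro x
        rw [PySem.Dict.getD_insert, PySem.Dict.getD_insert, PySem.Dict.getD_insert]
        rw [hc1, hc1, hw2, List.count_append]
        have hox := hinv x
        have hoadd := hinv add
        have horem := hinv remove
        rw [hw1] at hox hoadd horem
        rw [List.count_cons] at hox hoadd horem
        simp only [List.count_singleton]
        split_ifs with h1 h2 h2 <;>
          · subst_vars <;> simp_all <;> omega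
      have hcwin : (List.count add ((arr.drop (j + 1)).take (k' + 1)) : Int)
          = cWin arr (k' + 1) (j + (k' + 1)) := by
        unfold cWin
        rw [show j + (k' + 1) + 1 - (k' + 1) = j + 1 from by omega]
        rw [show j + (k' + 1) + 1 - (j + 1) = k' + 1 from by omega]
      rw [hinv' add, hcwin]
      have hl : (j : Int) + 1 = (((j + 1 : Nat)) : Int) := by omega
      have hr2 : (((j + (k' + 1) : Nat)) : Int) + 1 = (((j + 1 : Nat)) : Int) + (((k' + 1 : Nat)) : Int) := by omega
      rw [hl, hr2, ih (j + 1) _ _ (by omega) hinv']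
      rw [show arr.length - (j + (k' + 1)) = (arr.length - (j + 1 + (k' + 1))) + 1 from by omega,
        List.range'_succ, List.foldl_cons,
        show j + (k' + 1) + 1 = j + 1 + (k' + 1) from by omega]
    · rw [if_neg (by exact_mod_cast hlt)]
      have : arr.length - (j + (k' + 1)) = 0 := by omega
      rw [this]
      rfl

theorem main_eq (arr : List Int) (num : Int) (hpre : Pre_getResultNew arr num) :
    getResultNew arr num = getResultNew_alt arr num := by
  obtain ⟨hne, hnum⟩ := hpre
  have hlen : 0 < arr.length := List.length_pos_iff.mpr hne
  set k := num.toNat with hkdef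
  have hk1 : 1 ≤ k := by omega
  have hnumk : num = (k : Int) := by omega
  simp only [getResultNew]
  have hsl : PySem.List.slice arr (some 0) (some num) = arr.take k := by
    rw [PySem.List.slice_zero_start, PySem.List.slice_to arr (by omega)]
  rw [hsl]
  set w := arr.take k with hwdef
  have hwlen : w.length = min k arr.length := by rw [hwdef, List.length_take]
  have hwne : w ≠ [] := by
    apply List.ne_nil_of_length_pos
    omega
  have hbuild : w.foldl
      (fun d i =>
        let d' := if d.contains i then d else d.insert i 0
        d'.insert i (d'.getD i 0 + 1)) PySem.Dict.empty = PySem.Dict.counter w := by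
    rw [PySem.List.foldl_congr_mem w _ (fun d x => d.insert x (d.getD x 0 + 1)) _
      (fun acc x _ => build_step_eq acc x)]
    exact PySem.Dict.foldl_insert_getD_add_one_eq_counter w
  rw [hbuild]
  rw [altB arr num hnum, ← hkdef]
  have hloop := loopA arr k hk1 arr.length 0 (PySem.Dict.counter w)
      ((PySem.List.max? (PySem.Dict.counter w).values (fun v => v)).getD 0) (by omega)
      (by intro x; rw [List.drop_zero, ← hwdef]; exact PySem.Dict.getD_counter w x)
  simp only [Nat.cast_zero, zero_add] at hloop
  rw [← hnumk] at hloop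
  rw [hloop]
  set m := min k arr.length with hmdef
  have hsplit : List.range' 0 arr.length = List.range' 0 m ++ List.range' m (arr.length - m) := by
    have h := List.range'_append (s := 0) (m := m) (n := arr.length - m) (step := 1)
    rw [show 0 + 1 * m = m from by omega, show m + (arr.length - m) = arr.length from by omega] at h
    exact h.symm
  rw [hsplit, List.foldl_append]
  have hinit : (List.range' 0 m).foldl (fun mm q => max mm (cWin arr k q)) 0 =
      (PySem.List.max? (PySem.Dict.counter w).values (fun v => v)).getD 0 := by
    rw [counter_max_eq w hwne, hwlen]
    apply PySem.List.foldl_congr_mem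
    intro acc q hq
    rw [List.mem_range'_1] at hq
    have hqm : q < m := by omega
    have hq1 : q + 1 ≤ k := by omega
    have hqa : q < arr.length := by omega
    have e1 : w.getD q 0 = arr.getD q 0 := by
      rw [hwdef, List.getD_eq_getElem _ _ (by rw [List.length_take]; omega : q < (arr.take k).length),
        List.getD_eq_getElem _ _ hqa, List.getElem_take]
    have e2 : w.take (q + 1) = arr.take (q + 1) := by
      rw [hwdef, List.take_take, min_eq_left hq1]
    rw [e1, e2]
    unfold cWin
    rw [show q + 1 - k = 0 from by omega, List.drop_zero, Nat.sub_zero]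
  rw [hinit]
  by_cases h : k ≤ arr.length
  · rw [show m = k from by omega]
  · rw [show arr.length - k = 0 from by omega, show arr.length - m = 0 from by omega]
    rfl

-- ===== VERDICT (by name: the statement is the Claim_ definition above) =====
theorem getResultNew_spec : Claim_equal_getResultNew := by
  intro arr num _ hpre
  unfold Spec_getResultNew
  exact main_eq arr num hpre
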